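-- pv_equiv track=rewrite | github.com/eostiner/metacommunity_environmental_gradients | ranch_segments_canonical_v2_WORKS_Metric.py | choose_canonical_orientation
-- ===== SOURCE A (Python) =====
-- from typing import List, Tuple, Dict, Optional
--
-- def choose_canonical_orientation(n: int, order: List[str], name2idx: Dict[str,int]) -> Tuple[bool, Dict[str,int]]:
--     """Decide whether to keep as-is or reverse the track so that indices increase
--        in the provided order. Returns (reversed?, adjusted_mapping).
--     """
--     # Gather indices in the order list (skip names we failed to snap)
--     seq = [name2idx[nm] for nm in order if nm in name2idx]
--     if len(seq) < 2:
--         return False, name2idx  # nothing to decide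
--
--     increasing = all(b > a for a,b in zip(seq, seq[1:]))
--     if increasing:
--         return False, name2idx
--
--     # Try the reversed view: idx' = (n-1) - idx
--     rev_map = {nm: (n-1 - idx) for nm, idx in name2idx.items()}
--     rev_seq = [rev_map[nm] for nm in order if nm in rev_map]
--     rev_increasing = all(b > a for a,b in zip(rev_seq, rev_seq[1:]))
--
--     if rev_increasing:
--         return True, rev_map
--
--     # If neither strictly increasing, pick the orientation with the larger positive sum of forward deltas
--     def forward_score(s): return sum(max(0, b-a) for a,b in zip(s,s[1:]))
--     return (forward_score(rev_seq) > forward_score(seq)), (rev_map if forward_score(rev_seq) > forward_score(seq) else name2idx)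
-- ===== SOURCE B (Python) =====
-- from typing import List, Tuple, Dict
--
-- def choose_canonical_orientation(n: int, order: List[str], name2idx: Dict[str, int]) -> Tuple[bool, Dict[str, int]]:
--     # Telescoping: sum(max(0,d)) - sum(max(0,-d)) over consecutive deltas = last - first,
--     # and a strictly monotone direction is the one with the larger score, so every branch
--     # of the decision reduces to comparing the first and last mapped index.
--     first = None
--     last = None
--     count = 0
--     for nm in order:
--         if nm in name2idx:
--             v = name2idx[nm]
--             if first is None:
--                 first = v
--             last = v
--             count += 1
--     if count < 2 or first <= last:
--         return False, name2idx
--     return True, {nm: n - 1 - idx for nm, idx in name2idx.items()}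
-- ===== Notes on version B (the rewrite author's own statement) =====
-- stated objective: simpler
-- what changed: B computes no scores and no index sequences at all: by the telescoping identity sum(max(0,d)) - sum(max(0,-d)) = last - first, A's whole branch cascade (two monotonicity tests plus a score comparison) collapses to comparing the first and last mapped index, which B tracks in a single pass with three scalar accumulators, building the reversed map only when it is returned.
import Mathlib
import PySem

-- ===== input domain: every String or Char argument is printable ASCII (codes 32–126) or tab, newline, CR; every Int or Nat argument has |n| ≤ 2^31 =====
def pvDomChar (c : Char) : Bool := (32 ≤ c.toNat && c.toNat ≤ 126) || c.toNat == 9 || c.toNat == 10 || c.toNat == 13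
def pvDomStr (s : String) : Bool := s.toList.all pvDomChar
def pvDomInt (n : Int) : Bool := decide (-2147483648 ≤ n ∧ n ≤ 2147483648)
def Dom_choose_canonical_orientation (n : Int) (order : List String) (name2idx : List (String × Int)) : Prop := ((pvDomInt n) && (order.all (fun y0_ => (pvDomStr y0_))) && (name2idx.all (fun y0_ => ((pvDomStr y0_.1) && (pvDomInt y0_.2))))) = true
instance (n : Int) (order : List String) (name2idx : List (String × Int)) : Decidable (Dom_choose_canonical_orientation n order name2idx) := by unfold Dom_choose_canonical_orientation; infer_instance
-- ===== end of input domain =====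

-- B replaces A's score/monotonicity branch cascade by a one-pass first-vs-last index
-- comparison justified by a telescoping identity (objective: simpler).

-- dict lookup on the association list (Python: name2idx[nm] / nm in name2idx; first match)
def pvLookup (m : List (String × Int)) (nm : String) : Option Int :=
  (m.find? (fun p => p.1 == nm)).map (·.2)

-- ===== PORT A =====
-- Python: all(b > a for a,b in zip(seq, seq[1:]))
def pvInc (s : List Int) : Bool :=
  (s.zip (s.drop 1)).all (fun p => decide (p.1 < p.2))

-- Python: forward_score(s) = sum(max(0, b-a) for a,b in zip(s, s[1:]))
def pvFScore (s : List Int) : Int :=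
  ((s.zip (s.drop 1)).map (fun p => max 0 (p.2 - p.1))).sum

def choose_canonical_orientation (n : Int) (order : List String) (name2idx : List (String × Int)) : Bool × (List (String × Int)) :=
  let seq := order.filterMap (pvLookup name2idx)
  if seq.length < 2 then (false, name2idx)
  else if pvInc seq then (false, name2idx)
  else
    let rev_map := name2idx.map (fun p => (p.1, n - 1 - p.2))
    let rev_seq := order.filterMap (pvLookup rev_map)
    if pvInc rev_seq then (true, rev_map)
    else (decide (pvFScore rev_seq > pvFScore seq),
          if pvFScore rev_seq > pvFScore seq then rev_map else name2idx)

-- ===== PORT B =====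
-- B's single pass over `order`: state is (first, last, count); `first.getD v` keeps the
-- first mapped index (Python: `if first is None: first = v`).
def pvScanStep (m : List (String × Int)) (st : Option Int × Option Int × Int) (nm : String) :
    Option Int × Option Int × Int :=
  match pvLookup m nm with
  | none => st
  | some v => (some (st.1.getD v), some v, st.2.2 + 1)

def choose_canonical_orientation_alt (n : Int) (order : List String) (name2idx : List (String × Int)) : Bool × (List (String × Int)) :=
  let st := order.foldl (pvScanStep name2idx) (none, none, 0)
  -- when st.2.2 ≥ 2 both options are `some`; `getD 0` only realises that (Python compares the ints)
  if st.2.2 < 2 ∨ st.1.getD 0 ≤ st.2.1.getD 0 then (false, name2idx)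
  else (true, name2idx.map (fun p => (p.1, n - 1 - p.2)))

-- ===== PRECONDITION & SPEC =====
def Spec_choose_canonical_orientation (n : Int) (order : List String) (name2idx : List (String × Int)) (out : Bool × (List (String × Int))) : Prop := out = choose_canonical_orientation_alt n order name2idx
instance (n : Int) (order : List String) (name2idx : List (String × Int)) (out : Bool × (List (String × Int))) : Decidable (Spec_choose_canonical_orientation n order name2idx out) := by unfold Spec_choose_canonical_orientation; infer_instance

-- ===== CLAIM (what is proved, stated in full; the proofs are below) =====
def Claim_equal_choose_canonical_orientation : Prop := ∀ (n : Int) (order : List String) (name2idx : List (String × Int)), Dom_choose_canonical_orientation n order name2idx → Spec_choose_canonical_orientation n order name2idx (choose_canonical_orientation n order name2idx)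

-- ===== LEMMAS AND PROOFS =====

-- proof-side backward score: sum of max(0, a-b) over consecutive pairs
def pvBScore (s : List Int) : Int :=
  ((s.zip (s.drop 1)).map (fun p => max 0 (p.1 - p.2))).sum

-- lookup in the reversed map
lemma lookup_revMap (n : Int) (m : List (String × Int)) (nm : String) :
    pvLookup (m.map (fun p => (p.1, n - 1 - p.2))) nm
      = (pvLookup m nm).map (fun i => n - 1 - i) := by
  induction m with
  | nil => rfl
  | cons p t ih =>
    by_cases h : p.1 == nm
    · simp [pvLookup, h]
    · simp [pvLookup, h] at ih ⊢
      exact ih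

lemma revSeq_eq (n : Int) (order : List String) (m : List (String × Int)) :
    order.filterMap (pvLookup (m.map (fun p => (p.1, n - 1 - p.2))))
      = (order.filterMap (pvLookup m)).map (fun i => n - 1 - i) := by
  rw [List.map_filterMap]
  exact List.filterMap_congr (fun nm _ => lookup_revMap n m nm)

lemma zip_tail_map (f : Int → Int) (s : List Int) :
    (s.map f).zip ((s.map f).drop 1) = (s.zip (s.drop 1)).map (Prod.map f f) := by
  rw [← List.map_drop, List.zip_map]

lemma fscore_map_rev (c : Int) (s : List Int) :
    pvFScore (s.map (fun x => c - x)) = pvBScore s := by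
  unfold pvFScore pvBScore
  rw [zip_tail_map, List.map_map]
  refine congrArg List.sum (List.map_congr_left (fun p _ => ?_))
  obtain ⟨a, b⟩ := p
  simp only [Function.comp_apply, Prod.map]
  omega

-- B's fold over order equals the same fold over the matched sequence
lemma foldl_scan_eq (m : List (String × Int)) (order : List String)
    (st : Option Int × Option Int × Int) :
    order.foldl (pvScanStep m) st
      = (order.filterMap (pvLookup m)).foldl
          (fun st v => (some (st.1.getD v), some v, st.2.2 + 1)) st := by
  induction order generalizing st with
  | nil => rfl
  | cons nm t ih =>
    simp only [List.foldl_cons, List.filterMap_cons]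
    cases h : pvLookup m nm with
    | none => simp [pvScanStep, h, ih]
    | some v => simp [pvScanStep, h, ih]

-- the fold computes (first, last, length) of the matched sequence
lemma scan_char (s : List Int) (f : Int) (l : Option Int) (c : Int) :
    s.foldl (fun st v => (some (st.1.getD v), some v, st.2.2 + 1)) (some f, l, c)
      = (some f, s.getLast?.or l, c + (s.length : Int)) := by
  induction s generalizing l c with
  | nil => simp
  | cons a t ih =>
    simp only [List.foldl_cons, Option.getD_some, ih]
    refine Prod.ext rfl (Prod.ext ?_ (by simp; omega))
    cases t with
    | nil => simp
    | cons x r =>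
      cases hgl : (x :: r).getLast? with
      | none => simp [List.getLast?_eq_none_iff] at hgl
      | some y => simp [hgl]

-- the whole scan starting from the empty state
lemma scan_full (m : List (String × Int)) (order : List String) (a : Int) (rest : List Int)
    (h : order.filterMap (pvLookup m) = a :: rest) :
    order.foldl (pvScanStep m) (none, none, 0)
      = (some a, some (rest.getLastD a), 1 + (rest.length : Int)) := by
  rw [foldl_scan_eq, h, List.foldl_cons]
  simp only [Option.getD_none]
  rw [scan_char]
  refine Prod.ext rfl (Prod.ext ?_ (by simp))
  cases rest with
  | nil => simp
  | cons x r => simp [List.getLastD_eq_getLast?]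

-- telescoping: forward score minus backward score = last - first
lemma score_telescope (a : Int) (s : List Int) :
    pvFScore (a :: s) - pvBScore (a :: s) = s.getLastD a - a := by
  induction s generalizing a with
  | nil => simp [pvFScore, pvBScore]
  | cons b t ih =>
    have h := ih b
    simp only [pvFScore, pvBScore, List.zip_cons_cons, List.drop_succ_cons,
      List.drop_zero, List.map_cons, List.sum_cons, List.getLastD_cons] at h ⊢
    omega

-- generic facts about sums of clamped values
lemma sum_max_nonneg (f : Int × Int → Int) (L : List (Int × Int)) :
    0 ≤ (L.map (fun p => max 0 (f p))).sum := by
  apply List.sum_nonneg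
  intro x hx
  obtain ⟨q, _, rfl⟩ := List.mem_map.mp hx
  exact le_max_left _ _

lemma sum_max_zero (f : Int × Int → Int) (L : List (Int × Int))
    (h : ∀ p ∈ L, f p ≤ 0) : (L.map (fun p => max 0 (f p))).sum = 0 := by
  induction L with
  | nil => rfl
  | cons p t ih =>
    have h1 := h p (by simp)
    have h2 := ih (fun q hq => h q (by simp [hq]))
    simp only [List.map_cons, List.sum_cons, h2]
    omega

lemma sum_max_pos (f : Int × Int → Int) (L : List (Int × Int)) (hne : L ≠ [])
    (h : ∀ p ∈ L, 0 < f p) : 0 < (L.map (fun p => max 0 (f p))).sum := by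
  match L with
  | [] => exact absurd rfl hne
  | p :: t =>
    have h1 := h p (by simp)
    have h2 := sum_max_nonneg f t
    simp only [List.map_cons, List.sum_cons]
    omega

lemma zip_tail_ne (s : List Int) (h : ¬ s.length < 2) : s.zip (s.drop 1) ≠ [] := by
  match s with
  | [] => simp at h
  | [a] => simp at h
  | a :: b :: t => simp

-- strictly increasing: backward score zero (so fscore - bscore = fscore ≥ 0, and head < last)
lemma bscore_zero_of_inc (s : List Int) (h : pvInc s = true) : pvBScore s = 0 :=
  sum_max_zero _ _ (fun p hp => by
    have := List.all_eq_true.mp h p hp; simp at this; omega)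

lemma fscore_pos_of_inc (s : List Int) (hne : s.zip (s.drop 1) ≠ []) (h : pvInc s = true) :
    0 < pvFScore s :=
  sum_max_pos _ _ hne (fun p hp => by
    have := List.all_eq_true.mp h p hp; simp at this; omega)

lemma inc_map_rev (c : Int) (s : List Int) :
    pvInc (s.map (fun x => c - x))
      = (s.zip (s.drop 1)).all (fun p => decide (p.2 < p.1)) := by
  unfold pvInc
  rw [zip_tail_map, List.all_map]
  congr 1
  funext p
  obtain ⟨a, b⟩ := p
  simp only [Function.comp_apply, Prod.map, decide_eq_decide]
  omega

lemma fscore_zero_of_dec (s : List Int)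
    (h : (s.zip (s.drop 1)).all (fun p => decide (p.2 < p.1)) = true) : pvFScore s = 0 :=
  sum_max_zero _ _ (fun p hp => by
    have := List.all_eq_true.mp h p hp; simp at this; omega)

lemma bscore_pos_of_dec (s : List Int) (hne : s.zip (s.drop 1) ≠ [])
    (h : (s.zip (s.drop 1)).all (fun p => decide (p.2 < p.1)) = true) : 0 < pvBScore s :=
  sum_max_pos _ _ hne (fun p hp => by
    have := List.all_eq_true.mp h p hp; simp at this; omega)

-- ===== VERDICT (by name: the statement is the Claim_ definition above) =====
theorem choose_canonical_orientation_spec : Claim_equal_choose_canonical_orientation := by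
  intro n order m _
  unfold Spec_choose_canonical_orientation choose_canonical_orientation choose_canonical_orientation_alt
  simp only []
  rw [revSeq_eq n order m]
  match hs : order.filterMap (pvLookup m) with
  | [] =>
    rw [foldl_scan_eq, hs]
    simp
  | [a] =>
    rw [scan_full m order a [] hs]
    simp
  | a :: b :: t =>
    rw [scan_full m order a (b :: t) hs]
    have hlen : ¬ (a :: b :: t).length < 2 := by simp
    have hne := zip_tail_ne _ hlen
    have htel := score_telescope a (b :: t)
    simp only [Option.getD_some, if_neg hlen]
    by_cases hinc : pvInc (a :: b :: t) = true
    · have h0 := bscore_zero_of_inc _ hinc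
      have h1 := fscore_pos_of_inc _ hne hinc
      rw [if_pos hinc, if_pos (Or.inr (by omega))]
    · rw [if_neg hinc]
      by_cases hrinc : pvInc ((a :: b :: t).map (fun i => n - 1 - i)) = true
      · have hdec := (inc_map_rev (n - 1) (a :: b :: t)) ▸ hrinc
        have h0 := fscore_zero_of_dec _ hdec
        have h1 := bscore_pos_of_dec _ hne hdec
        have hlt : (b :: t).getLastD a < a := by omega
        rw [if_pos hrinc, if_neg (by
          push_neg
          exact ⟨by simp only [List.length_cons]; push_cast; omega, hlt⟩)]
      · rw [if_neg hrinc, fscore_map_rev]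
        by_cases hcmp : pvFScore (a :: b :: t) < pvBScore (a :: b :: t)
        · have hlt : (b :: t).getLastD a < a := by omega
          rw [if_pos hcmp, if_neg (by
            push_neg
            exact ⟨by simp only [List.length_cons]; push_cast; omega, hlt⟩), decide_eq_true hcmp]
        · rw [if_neg hcmp, if_pos (Or.inr (by omega)), decide_eq_false hcmp]
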